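-- pv_equiv track=rewrite | github.com/wbrackenbury/KondoCloud | kc/utils.py | path_dist
-- ===== SOURCE A (Python) =====
-- from itertools import tee, zip_longest
--
-- def path_dist(p1, p2):
--
--     p1_folds = p1.split("/")[:-1]
--     p2_folds = p2.split("/")[:-1]
--
--     for i, (fa, fb) in enumerate(zip_longest(p1_folds, p2_folds)):
--         if fa != fb:
--             p1_dist_to_end = max((len(p1_folds) - i), 0)
--             p2_dist_to_end = max((len(p2_folds) - i), 0)
--             return p1_dist_to_end + p2_dist_to_end
--
--     return 0
-- ===== SOURCE B (Python) =====
-- def path_dist(p1, p2):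
--     f1 = p1.split("/")[:-1]
--     f2 = p2.split("/")[:-1]
--     s1 = {tuple(f1[:i + 1]) for i in range(len(f1))}
--     s2 = {tuple(f2[:i + 1]) for i in range(len(f2))}
--     return len(s1 ^ s2)
-- ===== Notes on version B (the rewrite author's own statement) =====
-- stated objective: alternative
-- what changed: Replaces the fused zip_longest scan with early return by building the set of cumulative folder-prefix tuples of each path and returning the size of their symmetric difference.
import Mathlib
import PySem

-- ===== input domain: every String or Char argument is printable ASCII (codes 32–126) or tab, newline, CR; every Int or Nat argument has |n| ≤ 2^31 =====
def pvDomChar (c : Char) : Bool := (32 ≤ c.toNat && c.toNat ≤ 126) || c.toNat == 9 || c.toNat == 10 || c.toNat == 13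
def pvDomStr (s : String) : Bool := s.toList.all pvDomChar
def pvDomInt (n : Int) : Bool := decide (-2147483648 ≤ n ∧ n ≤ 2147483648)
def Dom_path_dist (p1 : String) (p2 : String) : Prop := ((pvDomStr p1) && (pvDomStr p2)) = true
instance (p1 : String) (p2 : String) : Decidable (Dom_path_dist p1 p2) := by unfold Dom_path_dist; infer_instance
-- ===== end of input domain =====

-- B replaces A's fused zip_longest scan with early return by the size of the symmetric difference of the two paths' cumulative folder-prefix sets (objective: alternative).


-- ===== PORT A =====
-- zip_longest(l1, l2) with None padding
def pvZipLongest {α : Type} : List α → List α → List (Option α × Option α)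
  | [], [] => []
  | [], b :: bs => (none, some b) :: pvZipLongest [] bs
  | a :: as, [] => (some a, none) :: pvZipLongest as []
  | a :: as, b :: bs => (some a, some b) :: pvZipLongest as bs

-- the for-loop with its early return; n1, n2 are len(p1_folds), len(p2_folds)
def pvLoopA (n1 n2 : Int) : Int → List (Option String × Option String) → Int
  | _, [] => 0
  | i, (fa, fb) :: rest =>
      if fa ≠ fb then max (n1 - i) 0 + max (n2 - i) 0
      else pvLoopA n1 n2 (i + 1) rest

def path_dist (p1 : String) (p2 : String) : Int :=
  let p1_folds := ((PySem.Str.split? p1 "/").getD []) |> (fun l => PySem.List.slice l none (some (-1)))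
  let p2_folds := ((PySem.Str.split? p2 "/").getD []) |> (fun l => PySem.List.slice l none (some (-1)))
  pvLoopA p1_folds.length p2_folds.length 0 (pvZipLongest p1_folds p2_folds)

-- ===== PORT B =====
-- {tuple(l[:i+1]) for i in range(len(l))} (tuples as List String; range order, first insertion)
def pvPrefixSet (l : List String) : PySem.Set (List String) :=
  PySem.Set.ofList ((List.range l.length).map (fun i => l.take (i + 1)))

def path_dist_alt (p1 : String) (p2 : String) : Int :=
  let f1 := ((PySem.Str.split? p1 "/").getD []) |> (fun l => PySem.List.slice l none (some (-1)))
  let f2 := ((PySem.Str.split? p2 "/").getD []) |> (fun l => PySem.List.slice l none (some (-1)))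
  let s1 := pvPrefixSet f1
  let s2 := pvPrefixSet f2
  (PySem.Set.len (PySem.Set.symmDiff s1 s2) : Int)

-- ===== PRECONDITION & SPEC =====
def Spec_path_dist (p1 : String) (p2 : String) (out : Int) : Prop := out = path_dist_alt p1 p2
instance (p1 : String) (p2 : String) (out : Int) : Decidable (Spec_path_dist p1 p2 out) := by unfold Spec_path_dist; infer_instance

-- ===== CLAIM (what is proved, stated in full; the proofs are below) =====
def Claim_equal_path_dist : Prop := ∀ (p1 : String) (p2 : String), Dom_path_dist p1 p2 → Spec_path_dist p1 p2 (path_dist p1 p2)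

-- ===== LEMMAS AND PROOFS =====

-- common-prefix length of two lists
def pvCpl : List String → List String → Nat
  | a :: as, b :: bs => if a = b then pvCpl as bs + 1 else 0
  | _, _ => 0

theorem pvCpl_le_left (l1 l2 : List String) : pvCpl l1 l2 ≤ l1.length := by
  induction l1 generalizing l2 with
  | nil => simp [pvCpl]
  | cons a as ih =>
    cases l2 with
    | nil => simp [pvCpl]
    | cons b bs =>
      simp only [pvCpl, List.length_cons]
      split
      · exact Nat.succ_le_succ (ih bs)
      · omega

theorem pvCpl_comm (l1 l2 : List String) : pvCpl l1 l2 = pvCpl l2 l1 := by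
  induction l1 generalizing l2 with
  | nil => cases l2 <;> simp [pvCpl]
  | cons a as ih =>
    cases l2 with
    | nil => simp [pvCpl]
    | cons b bs =>
      simp only [pvCpl]
      by_cases h : a = b
      · subst h; simp [ih]
      · rw [if_neg h, if_neg fun hh => h hh.symm]

-- A's loop equals the closed form len1 + len2 - 2 * cpl.
theorem pvLoopA_eq (l1 l2 : List String) (i : Int) :
    pvLoopA (i + l1.length) (i + l2.length) i (pvZipLongest l1 l2)
      = (l1.length : Int) + l2.length - 2 * pvCpl l1 l2 := by
  induction l1 generalizing l2 i with
  | nil =>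
    induction l2 generalizing i with
    | nil => simp [pvZipLongest, pvLoopA, pvCpl]
    | cons b bs ih =>
      simp only [pvZipLongest, pvLoopA, pvCpl, List.length_nil, List.length_cons] at *
      split
      · push_cast; omega
      · simp_all
  | cons a as ih =>
    cases l2 with
    | nil =>
      simp only [pvZipLongest, pvLoopA, pvCpl, List.length_cons, List.length_nil]
      split
      · push_cast; omega
      · simp_all
    | cons b bs =>
      simp only [pvZipLongest, pvLoopA, pvCpl, List.length_cons]
      by_cases hab : a = b
      · subst hab
        simp only [ne_eq, not_true_eq_false, if_false, if_true]
        have := ih bs (i + 1)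
        push_cast at this ⊢
        rw [show i + (↑as.length + 1) = i + 1 + ↑as.length by ring,
            show i + (↑bs.length + 1) = i + 1 + ↑bs.length by ring]
        rw [this]; ring
      · simp only [ne_eq, Option.some.injEq, hab, not_false_eq_true, if_true, if_false]
        push_cast; omega

-- take k agrees iff k is within the common prefix (for k within both lengths)
theorem pvTake_eq_iff (l1 l2 : List String) (k : Nat)
    (h1 : k ≤ l1.length) (h2 : k ≤ l2.length) :
    l1.take k = l2.take k ↔ k ≤ pvCpl l1 l2 := by
  induction k generalizing l1 l2 with
  | zero => simp
  | succ n ih =>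
    cases l1 with
    | nil => simp at h1
    | cons a as =>
      cases l2 with
      | nil => simp at h2
      | cons b bs =>
        simp only [List.take_succ_cons, List.cons.injEq, pvCpl, List.length_cons] at *
        by_cases hab : a = b
        · subst hab
          simp only [true_and, if_true]
          rw [ih as bs (by omega) (by omega)]
          omega
        · simp [hab]

-- membership of a prefix of l1 in l2's prefix list
theorem pvMem_prefixes (l1 l2 : List String) (i : Nat) (hi : i < l1.length) :
    (l1.take (i + 1) ∈ (List.range l2.length).map (fun j => l2.take (j + 1))) ↔ i < pvCpl l1 l2 := by
  constructor
  · rintro h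
    rcases List.mem_map.mp h with ⟨j, hj, hEq⟩
    rw [List.mem_range] at hj
    have hlen : (l1.take (i + 1)).length = (l2.take (j + 1)).length := by rw [hEq]
    rw [List.length_take, List.length_take] at hlen
    have hij : i = j := by omega
    subst hij
    have := (pvTake_eq_iff l1 l2 (i + 1) (by omega) (by omega)).mp hEq.symm
    omega
  · intro h
    have hc2 : pvCpl l1 l2 ≤ l2.length := by rw [pvCpl_comm]; exact pvCpl_le_left l2 l1
    refine List.mem_map.mpr ⟨i, List.mem_range.mpr (by omega), ?_⟩
    exact ((pvTake_eq_iff l1 l2 (i + 1) (by omega) (by omega)).mpr (by omega)).symm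

-- the prefix list has no duplicates (distinct lengths)
theorem pvPrefixes_nodup (l : List String) :
    ((List.range l.length).map (fun i => l.take (i + 1))).Nodup := by
  refine List.Nodup.map_on ?_ (List.nodup_range)
  intro i hi j hj hEq
  rw [List.mem_range] at hi hj
  have : (l.take (i + 1)).length = (l.take (j + 1)).length := by rw [hEq]
  rw [List.length_take, List.length_take] at this
  omega

theorem pvPrefixSet_eq (l : List String) :
    pvPrefixSet l = (List.range l.length).map (fun i => l.take (i + 1)) := by
  unfold pvPrefixSet
  exact PySem.Set.ofList_eq_self_of_nodup _ (pvPrefixes_nodup l)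

-- count of indices i < n with c ≤ i
theorem pvRange_filter_ge (n c : Nat) :
    ((List.range n).filter (fun i => !decide (i < c))).length = n - c := by
  induction n with
  | zero => simp
  | succ m ih =>
    rw [List.range_succ, List.filter_append, List.length_append, ih]
    by_cases h : m < c
    · simp [h]; omega
    · simp [h]; omega

-- one side of the symmetric difference counts len1 - cpl
theorem pvDiff_len (l1 l2 : List String) :
    (((List.range l1.length).map (fun i => l1.take (i + 1))).filter
       (fun x => !PySem.Set.contains ((List.range l2.length).map (fun j => l2.take (j + 1))) x)).length
      = l1.length - pvCpl l1 l2 := by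
  rw [List.filter_map, List.length_map]
  rw [List.filter_congr (l := List.range l1.length)
      (q := fun i => !decide (i < pvCpl l1 l2)) ?_]
  · exact pvRange_filter_ge l1.length (pvCpl l1 l2)
  · intro i hi
    rw [List.mem_range] at hi
    have hmem := pvMem_prefixes l1 l2 i hi
    simp only [Function.comp_apply, PySem.Set.contains_eq_listContains]
    by_cases h : i < pvCpl l1 l2
    · have hm : l1.take (i + 1) ∈ (List.range l2.length).map (fun j => l2.take (j + 1)) :=
        hmem.mpr h
      simp [h, hm]
    · have hm : l1.take (i + 1) ∉ (List.range l2.length).map (fun j => l2.take (j + 1)) :=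
        fun hm => h (hmem.mp hm)
      simp [h, hm]

-- ===== VERDICT (by name: the statement is the Claim_ definition above) =====
theorem path_dist_spec : Claim_equal_path_dist := by
  intro p1 p2 _
  unfold Spec_path_dist path_dist path_dist_alt
  set l1 := ((PySem.Str.split? p1 "/").getD []) |> (fun l => PySem.List.slice l none (some (-1))) with hl1
  set l2 := ((PySem.Str.split? p2 "/").getD []) |> (fun l => PySem.List.slice l none (some (-1))) with hl2
  have hA := pvLoopA_eq l1 l2 0
  simp only [zero_add] at hA
  rw [hA]
  have h1 := pvCpl_le_left l1 l2
  have h2 : pvCpl l1 l2 ≤ l2.length := by rw [pvCpl_comm]; exact pvCpl_le_left l2 l1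
  simp only [pvPrefixSet_eq, PySem.Set.symmDiff, PySem.Set.diff, PySem.Set.len,
    List.length_append]
  rw [pvDiff_len l1 l2]
  have := pvDiff_len l2 l1
  rw [pvCpl_comm l2 l1] at this
  rw [this]
  push_cast
  omega
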